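-- pv_equiv track=rewrite | github.com/Estuardo07/Lab_C | metodos.py | miSplit
-- ===== SOURCE A (Python) =====
-- def miSplit(string, separator):
--     result = []
--     start = 0
--     for i in range(len(string)):
--         if string[i:i+len(separator)] == separator:
--             result.append(string[start:i])
--             start = i+len(separator)
--     result.append(string[start:])
--     return result
-- ===== SOURCE B (Python) =====
-- def miSplit(string, separator):
--     n = len(string)
--     L = len(separator)
--     positions = []
--     pos = string.find(separator)
--     while 0 <= pos < n:
--         positions.append(pos)
--         pos = string.find(separator, pos + 1)
--     result = []
--     start = 0
--     for p in positions:
--         result.append(string[start:p])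
--         start = p + L
--     result.append(string[start:])
--     return result
-- ===== Notes on version B (the rewrite author's own statement) =====
-- stated objective: faster
-- what changed: Instead of testing for a separator match at every index with a fresh slice comparison, B collects all (overlapping) match positions by repeated str.find jumps and then builds the pieces in one pass over those positions.
import Mathlib
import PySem

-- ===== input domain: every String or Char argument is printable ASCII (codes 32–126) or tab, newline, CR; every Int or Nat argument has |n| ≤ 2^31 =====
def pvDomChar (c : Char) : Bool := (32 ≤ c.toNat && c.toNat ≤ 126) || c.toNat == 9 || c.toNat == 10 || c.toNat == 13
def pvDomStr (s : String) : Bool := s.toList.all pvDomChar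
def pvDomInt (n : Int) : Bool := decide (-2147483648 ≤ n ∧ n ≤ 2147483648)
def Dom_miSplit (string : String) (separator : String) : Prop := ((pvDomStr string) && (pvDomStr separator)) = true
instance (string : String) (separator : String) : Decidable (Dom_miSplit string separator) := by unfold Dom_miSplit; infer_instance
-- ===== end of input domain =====

-- B replaces A's per-index slice comparison with repeated str.find jumps that collect all
-- (overlapping) match positions, then one pass builds the pieces; objective: faster (constant factor).


-- ===== PORT A =====
def miSplit (string : String) (separator : String) : List String :=
  let r := (PySem.List.pyRange 0 (PySem.Str.len string) 1).foldl
    (fun (acc : List String × Int) (i : Int) =>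
      if PySem.Str.slice string (some i) (some (i + PySem.Str.len separator)) == separator then
        (acc.1 ++ [PySem.Str.slice string (some acc.2) (some i)], i + PySem.Str.len separator)
      else acc) ([], 0)
  r.1 ++ [PySem.Str.slice string (some r.2) none]

-- ===== PORT B =====
-- B's 'while 0 <= pos < n: positions.append(pos); pos = string.find(separator, pos+1)' loop;
-- fuel bounds the iteration count (each found position is strictly larger than the previous one)
def miSplitCollect (s sep : String) (fuel : Nat) (pos : Int) : List Int :=
  match fuel with
  | 0 => []
  | f+1 =>
    if 0 ≤ pos ∧ pos < PySem.Str.len s then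
      pos :: miSplitCollect s sep f (PySem.Str.findFrom s sep (pos + 1) none)
    else []

def miSplit_alt (string : String) (separator : String) : List String :=
  let positions := miSplitCollect string separator ((PySem.Str.len string).toNat + 1)
    (PySem.Str.find string separator)
  let r := positions.foldl
    (fun (acc : List String × Int) (p : Int) =>
      (acc.1 ++ [PySem.Str.slice string (some acc.2) (some p)], p + PySem.Str.len separator))
    ([], 0)
  r.1 ++ [PySem.Str.slice string (some r.2) none]

-- ===== PRECONDITION & SPEC =====
def Spec_miSplit (string : String) (separator : String) (out : List String) : Prop := out = miSplit_alt string separator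
instance (string : String) (separator : String) (out : List String) : Decidable (Spec_miSplit string separator out) := by unfold Spec_miSplit; infer_instance

-- ===== CLAIM (what is proved, stated in full; the proofs are below) =====
def Claim_equal_miSplit : Prop := ∀ (string : String) (separator : String), Dom_miSplit string separator → Spec_miSplit string separator (miSplit string separator)

-- ===== LEMMAS AND PROOFS =====

-- A's per-index test, as a Bool predicate on the index
def pvMatchB (string separator : String) (i : Int) : Bool :=
  PySem.Str.slice string (some i) (some (i + PySem.Str.len separator)) == separator

-- A's test at a natural index holds iff the separator is a prefix of the tail there
theorem pvMatchB_iff (string separator : String) (j : Nat) :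
    pvMatchB string separator (j : Int) = true ↔
      separator.toList <+: string.toList.drop j := by
  unfold pvMatchB
  rw [beq_iff_eq]
  rw [show PySem.Str.len separator = ((separator.toList.length : Nat) : Int) by
    simp [PySem.Str.len_eq]]
  have hsl : (PySem.Str.slice string (some (j : Int))
      (some ((j : Int) + (separator.toList.length : Int)))).toList
      = (string.toList.drop j).take separator.toList.length := by
    rw [PySem.Str.toList_slice]
    simp [PySem.Chars.slice_eq_listSlice, PySem.List.slice_natCast_add]
  constructor
  · intro h
    have := congrArg String.toList h
    rw [hsl] at this
    rw [← this]
    exact List.take_prefix _ _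
  · intro h
    apply String.toList_injective
    rw [hsl]
    exact (List.prefix_iff_eq_take.mp h).symm

-- range(len(string)) as a mapped Nat range
theorem pvRange_eq (string : String) :
    PySem.List.pyRange 0 (PySem.Str.len string) 1
      = (List.range string.toList.length).map (fun i : Nat => (i : Int)) := by
  rw [PySem.List.pyRange_of_pos 0 (PySem.Str.len string) (by norm_num)]
  have h : (if 0 < string.length then string.length else 0) = string.length := by
    split <;> omega
  simp [PySem.Str.len_eq, h, List.map_eq_flatMap]

-- a prefix match at i ≥ k gives an occurrence inside drop k
theorem pvInfix_of_prefix (cs ps : List Char) (k i : Nat) (hki : k ≤ i)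
    (h : ps <+: cs.drop i) : ps <:+: cs.drop k := by
  have : cs.drop i = (cs.drop k).drop (i - k) := by
    rw [List.drop_drop]; congr 1; omega
  rw [this] at h
  exact h.isInfix.trans (List.drop_suffix _ _).isInfix

theorem pvFilter_nil (p : Int → Bool) (k n : Nat)
    (hfail : ∀ i : Nat, k ≤ i → i < n → ¬ p (i : Int) = true) :
    ((List.range' k (n - k)).map (fun i : Nat => (i : Int))).filter p = [] := by
  rw [List.filter_eq_nil_iff]
  intro a ha
  obtain ⟨i, hi, rfl⟩ := List.mem_map.mp ha
  rw [List.mem_range'_1] at hi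
  exact hfail i hi.1 (by omega)

theorem pvFilter_split (p : Int → Bool) (k j n : Nat) (hkj : k ≤ j) (hjn : j < n)
    (hfail : ∀ i : Nat, k ≤ i → i < j → ¬ p (i : Int) = true) (hpj : p (j : Int) = true) :
    ((List.range' k (n - k)).map (fun i : Nat => (i : Int))).filter p
      = (j : Int) :: ((List.range' (j+1) (n - (j+1))).map (fun i : Nat => (i : Int))).filter p := by
  have hsplit : List.range' k (n - k)
      = List.range' k (j - k) ++ j :: List.range' (j+1) (n - (j+1)) := by
    have h1 := List.range'_append (s := k) (m := j - k) (n := n - j) (step := 1)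
    rw [show k + 1 * (j - k) = j by omega, show (j - k) + (n - j) = n - k by omega] at h1
    rw [← h1]
    congr 1
    rw [show n - j = (n - (j+1)) + 1 by omega, List.range'_succ]
  rw [hsplit, List.map_append, List.filter_append,
    pvFilter_nil p k j (by simpa using hfail)]
  simp [hpj]

-- the find-jump loop collects exactly the matching indices in [k, n)
theorem pvCollect_eq (string separator : String) (fuel k : Nat)
    (hk : k ≤ string.toList.length) (hf : string.toList.length + 1 - k ≤ fuel) :
    miSplitCollect string separator fuel (PySem.Str.findFrom string separator (k : Int) none)
      = ((List.range' k (string.toList.length - k)).map (fun i : Nat => (i : Int))).filter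
          (pvMatchB string separator) := by
  induction fuel generalizing k with
  | zero => omega
  | succ f ih =>
    have hlen : PySem.Str.len string = ((string.toList.length : Nat) : Int) := by
      simp [PySem.Str.len_eq]
    rw [PySem.Str.findFrom_eq]
    by_cases hneg : PySem.Chars.findFrom string.toList separator.toList (k : Int) none = -1
    · rw [hneg, miSplitCollect, if_neg (by simp)]
      exact (pvFilter_nil _ k _ (fun i hik hin hp =>
        ((PySem.Chars.findFrom_natCast_eq_neg_one_iff string.toList separator.toList k hk).mp hneg)
          (pvInfix_of_prefix _ _ k i hik ((pvMatchB_iff string separator i).mp hp)))).symm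
    · obtain ⟨h1, h2, h3⟩ := PySem.Chars.findFrom_natCast_spec string.toList separator.toList k hk hneg
      set F := PySem.Chars.findFrom string.toList separator.toList (k : Int) none with hF
      have hF0 : 0 ≤ F := le_trans (by positivity) h1
      have hFj : F = (F.toNat : Int) := (Int.toNat_of_nonneg hF0).symm
      set j := F.toNat with hj
      have hkj : k ≤ j := by omega
      have hfail : ∀ i : Nat, k ≤ i → i < j → ¬ pvMatchB string separator (i : Int) = true :=
        fun i hik hij hp => h3 i hik hij ((pvMatchB_iff string separator i).mp hp)
      have hjn : j ≤ string.toList.length := by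
        have hform := PySem.Chars.findFrom_natCast string.toList separator.toList k hk
        rw [← hF] at hform
        by_cases hfind : PySem.Chars.find (string.toList.drop k) separator.toList = -1
        · rw [if_pos hfind] at hform; exact absurd hform hneg
        · rw [if_neg hfind] at hform
          have hle := PySem.Chars.find_le_length (string.toList.drop k) separator.toList
          rw [List.length_drop] at hle
          omega
      rw [miSplitCollect]
      by_cases hlt : j < string.toList.length
      · rw [if_pos (by rw [hFj, hlen]; constructor <;> [positivity; exact_mod_cast hlt])]
        rw [show F + 1 = ((j + 1 : Nat) : Int) by omega]
        rw [ih (j+1) (by omega) (by omega), hFj]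
        exact (pvFilter_split _ k j _ hkj hlt hfail
          ((pvMatchB_iff string separator j).mpr h2)).symm
      · rw [if_neg (by rw [hFj, hlen]; intro ⟨_, hc⟩; exact hlt (by exact_mod_cast hc))]
        exact (pvFilter_nil _ k _ (fun i hik hin => hfail i hik (by omega))).symm

-- B's positions are exactly the indices at which A's test succeeds
theorem pvPositions_eq (string separator : String) :
    miSplitCollect string separator ((PySem.Str.len string).toNat + 1) (PySem.Str.find string separator)
      = ((List.range string.toList.length).map (fun i : Nat => (i : Int))).filter
          (pvMatchB string separator) := by
  have h0 : PySem.Str.find string separator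
      = PySem.Str.findFrom string separator ((0 : Nat) : Int) none := by
    simp [PySem.Str.find_eq, PySem.Str.findFrom_eq]
  rw [h0, pvCollect_eq string separator _ 0 (by omega)
    (by simp [PySem.Str.len_eq])]
  rw [List.range_eq_range']
  norm_num

-- ===== VERDICT (by name: the statement is the Claim_ definition above) =====
theorem miSplit_spec : Claim_equal_miSplit := by
  intro string separator _
  unfold Spec_miSplit miSplit miSplit_alt
  rw [pvPositions_eq, pvRange_eq]
  simp only [List.foldl_filter]
  unfold pvMatchB
  rfl
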